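-- pv_equiv track=rewrite | github.com/ShreyasAwankar/pythonPractice | sumdiff.py | sumDiff
-- ===== SOURCE A (Python) =====
-- def sumDiff(m,n):
--     divisible = 0
--     nondivisible =0
--     for i in range (m+1):
--         if i%n==0:
--             divisible+=i
--         else:
--             nondivisible+=i
--     return abs(nondivisible-divisible)
-- ===== SOURCE B (Python) =====
-- def sumDiff(m, n):
--     if m < 0:
--         return 0
--     a = abs(n)
--     total = m * (m + 1) // 2
--     k = m // a
--     div = a * k * (k + 1) // 2
--     return abs(total - 2 * div)
-- ===== Notes on version B (the rewrite author's own statement) =====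
-- stated objective: faster
-- what changed: Replaced the O(m) loop that classifies every i in 0..m with closed-form arithmetic-series formulas: total = m(m+1)/2 and divisible-sum = |n|*k(k+1)/2 with k = m//|n|, answer = |total - 2*divisible|.
import Mathlib
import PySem

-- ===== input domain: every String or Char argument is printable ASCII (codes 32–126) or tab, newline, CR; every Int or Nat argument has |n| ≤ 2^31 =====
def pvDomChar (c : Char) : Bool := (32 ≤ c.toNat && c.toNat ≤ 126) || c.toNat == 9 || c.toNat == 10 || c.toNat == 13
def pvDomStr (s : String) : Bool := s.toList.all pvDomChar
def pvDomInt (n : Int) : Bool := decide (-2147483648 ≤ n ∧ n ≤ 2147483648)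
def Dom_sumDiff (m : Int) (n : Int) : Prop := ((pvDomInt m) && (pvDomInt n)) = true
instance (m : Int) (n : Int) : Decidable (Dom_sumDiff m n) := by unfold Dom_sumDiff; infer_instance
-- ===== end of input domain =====

-- B replaces A's O(m) classification loop by closed-form arithmetic-series formulas (objective: faster).

-- ===== PORT A =====
-- one loop step: add i to `divisible` if i % n == 0, else to `nondivisible`
def sumDiffStep (n : Int) (s : Int × Int) (i : Int) : Int × Int :=
  if PySem.Int.mod i n = 0 then (s.1 + i, s.2) else (s.1, s.2 + i)

def sumDiff (m : Int) (n : Int) : Int :=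
  let p := (PySem.List.pyRange 0 (m + 1) 1).foldl (sumDiffStep n) (0, 0)
  |p.2 - p.1|

-- ===== PORT B =====
def sumDiff_alt (m : Int) (n : Int) : Int :=
  if m < 0 then 0
  else
    let a := |n|
    let total := PySem.Int.floordiv (m * (m + 1)) 2
    let k := PySem.Int.floordiv m a
    let div := PySem.Int.floordiv (a * k * (k + 1)) 2
    |total - 2 * div|

-- ===== PRECONDITION & SPEC =====
-- Pre_ excludes exactly n = 0, where Python A raises ZeroDivisionError (i % 0).
def Pre_sumDiff (m : Int) (n : Int) : Prop := n ≠ 0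
instance (m : Int) (n : Int) : Decidable (Pre_sumDiff m n) := by unfold Pre_sumDiff; infer_instance
def pvWitness_sumDiff : Int × Int := (10, 3)

def Spec_sumDiff (m : Int) (n : Int) (out : Int) : Prop := out = sumDiff_alt m n
instance (m : Int) (n : Int) (out : Int) : Decidable (Spec_sumDiff m n out) := by unfold Spec_sumDiff; infer_instance

-- ===== CLAIM (what is proved, stated in full; the proofs are below) =====
def Claim_equal_sumDiff : Prop := ∀ (m : Int) (n : Int), Dom_sumDiff m n → Pre_sumDiff m n → Spec_sumDiff m n (sumDiff m n)

-- ===== LEMMAS AND PROOFS =====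

-- Loop invariant: after folding over 0..b the pair (d, nd) satisfies
-- 2*d = |n|*q*(q+1) and 2*(d+nd) = b*(b+1), where b = |n|*q + r, 0 ≤ r < |n|.
theorem sumDiff_loop_spec (n : Int) (hn : n ≠ 0) :
    ∀ b : Int, 0 ≤ b →
      ∃ q r : Int,
        b = |n| * q + r ∧ 0 ≤ r ∧ r < |n| ∧
        2 * ((PySem.List.pyRange 0 (b + 1) 1).foldl (sumDiffStep n) (0, 0)).1
          = |n| * q * (q + 1) ∧
        2 * (((PySem.List.pyRange 0 (b + 1) 1).foldl (sumDiffStep n) (0, 0)).1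
             + ((PySem.List.pyRange 0 (b + 1) 1).foldl (sumDiffStep n) (0, 0)).2)
          = b * (b + 1) := by
  have ha : 0 < |n| := abs_pos.mpr hn
  intro b hb
  induction b, hb using Int.le_induction with
  | base =>
    refine ⟨0, 0, by ring, le_refl 0, ha, ?_, ?_⟩ <;>
    · rw [show (0 : Int) + 1 = 0 + 1 from rfl, PySem.List.pyRange_one_singleton]
      simp [sumDiffStep, (PySem.Int.mod_eq_zero_iff_dvd 0 n).mpr (dvd_zero n)]
  | succ b hb0 ih =>
    obtain ⟨q, r, hbqr, hr0, hrlt, hD, hT⟩ := ih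
    rw [show b + 1 + 1 = (b + 1) + 1 from rfl,
        PySem.List.pyRange_one_succ_right (by omega : (0:Int) ≤ b + 1),
        List.foldl_append]
    set p := (PySem.List.pyRange 0 (b + 1) 1).foldl (sumDiffStep n) (0, 0) with hp
    simp only [List.foldl_cons, List.foldl_nil]
    by_cases hdvd : n ∣ (b + 1)
    · -- b+1 is a multiple of |n| : r + 1 must equal |n|
      have habs : |n| ∣ (b + 1) := (abs_dvd n (b + 1)).mpr hdvd
      have hra : r + 1 = |n| := by
        obtain ⟨c, hc⟩ := habs
        have h1 : |n| * (c - q) = r + 1 := by linear_combination hbqr - hc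
        have h2 : 0 < c - q := by nlinarith
        have h3 : c - q < 2 := by nlinarith
        have h4 : c - q = 1 := by omega
        rw [h4, mul_one] at h1
        omega
      refine ⟨q + 1, 0, by linear_combination hbqr + hra, le_refl 0, ha, ?_, ?_⟩
      · simp [sumDiffStep, (PySem.Int.mod_eq_zero_iff_dvd (b + 1) n).mpr hdvd]
        linear_combination hD + 2 * hbqr + 2 * hra
      · simp [sumDiffStep, (PySem.Int.mod_eq_zero_iff_dvd (b + 1) n).mpr hdvd]
        linear_combination hT
    · -- b+1 not a multiple of n
      have hmod : ¬ PySem.Int.mod (b + 1) n = 0 := by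
        rw [PySem.Int.mod_eq_zero_iff_dvd]; exact hdvd
      refine ⟨q, r + 1, by linear_combination hbqr, by omega, ?_, ?_, ?_⟩
      · -- r + 1 < |n| : else |n| ∣ b+1
        rcases lt_or_eq_of_le (by omega : r + 1 ≤ |n|) with h | h
        · exact h
        · exfalso
          apply hdvd
          rw [← abs_dvd]
          exact ⟨q + 1, by linear_combination hbqr + h⟩
      · simp [sumDiffStep, hmod]; linear_combination hD
      · simp [sumDiffStep, hmod]; linear_combination hT

-- ===== VERDICT (by name: the statement is the Claim_ definition above) =====
theorem sumDiff_spec : Claim_equal_sumDiff := by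
  intro m n _ hn
  unfold Spec_sumDiff sumDiff sumDiff_alt
  by_cases hm : m < 0
  · rw [PySem.List.pyRange_one_eq_nil (by omega : m + 1 ≤ 0)]
    simp [hm]
  · push_neg at hm
    have ha : 0 < |n| := abs_pos.mpr hn
    obtain ⟨q, r, hbqr, hr0, hrlt, hD, hT⟩ := sumDiff_loop_spec n hn m hm
    set p := (PySem.List.pyRange 0 (m + 1) 1).foldl (sumDiffStep n) (0, 0) with hp
    have hk : PySem.Int.floordiv m |n| = q := by
      rw [PySem.Int.floordiv_eq_iff_of_pos ha]
      constructor <;> nlinarith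
    have htot : PySem.Int.floordiv (m * (m + 1)) 2 = p.1 + p.2 := by
      rw [PySem.Int.floordiv_eq_ediv_of_pos (by norm_num), ← hT]
      exact Int.mul_ediv_cancel_left _ (by norm_num)
    have hdiv : PySem.Int.floordiv (|n| * q * (q + 1)) 2 = p.1 := by
      rw [PySem.Int.floordiv_eq_ediv_of_pos (by norm_num), ← hD]
      exact Int.mul_ediv_cancel_left _ (by norm_num)
    simp only [if_neg (not_lt.mpr hm), hk, htot, hdiv]
    congr 1
    ring
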